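-- pv_equiv track=rewrite | github.com/Azure/PSRule.Rules.Azure | docs/hooks/old_hooks.py | add_tags
-- ===== SOURCE A (Python) =====
-- def add_tags(markdown: str) -> str:
--     lines = markdown.splitlines()
--     converted = []
--     foundHeader = False
--     for l in lines:
--         converted.append(l)
--         if l.startswith("# ") and not foundHeader:
--             converted.append("<!-- TAGS -->")
--             foundHeader = True
--
--     return "\r".join(converted)
-- ===== SOURCE B (Python) =====
-- def add_tags(markdown: str) -> str:
--     lines = markdown.splitlines()
--     if not lines:
--         return ""
--     out = cur = lines[0]
--     i = 1
--     while i < len(lines) and not cur.startswith("# "):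
--         cur = lines[i]
--         out += "\r" + cur
--         i += 1
--     if cur.startswith("# "):
--         out += "\r<!-- TAGS -->"
--         if i < len(lines):
--             out += "\r" + "\r".join(lines[i:])
--     return out
-- ===== Notes on version B (the rewrite author's own statement) =====
-- stated objective: alternative
-- what changed: Replaces A's flag-guarded list accumulation followed by a whole-list join with an early-exiting while loop that builds the joined output string directly while scanning for the first header, then appends the tag and the joined untouched tail (no flag, no accumulator list, no join in the no-header path).
import Mathlib
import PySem

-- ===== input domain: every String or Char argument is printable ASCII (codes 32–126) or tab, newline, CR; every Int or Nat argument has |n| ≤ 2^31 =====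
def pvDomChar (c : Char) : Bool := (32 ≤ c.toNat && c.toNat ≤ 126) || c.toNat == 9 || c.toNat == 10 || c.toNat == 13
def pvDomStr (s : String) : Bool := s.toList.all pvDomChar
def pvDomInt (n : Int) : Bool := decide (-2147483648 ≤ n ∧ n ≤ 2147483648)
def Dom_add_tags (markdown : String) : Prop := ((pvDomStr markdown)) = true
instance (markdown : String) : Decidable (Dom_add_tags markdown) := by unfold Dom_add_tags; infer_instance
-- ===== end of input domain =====

-- B replaces A's flag-guarded list accumulation + final join by an early-exiting loop that builds
-- the joined output string directly while searching for the first header, then splices in the tag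
-- and the joined untouched tail; objective: alternative.

-- ===== PORT A =====
def add_tags (markdown : String) : String :=
  let lines := PySem.Str.splitlines markdown
  let st := lines.foldl (fun (acc : List String × Bool) l =>
    let conv := acc.1 ++ [l]
    if PySem.Str.startswith l "# " && !acc.2 then (conv ++ ["<!-- TAGS -->"], true)
    else (conv, acc.2)) ([], false)
  PySem.Str.join "\r" st.1

-- ===== PORT B =====
-- the while loop of Source B: state (out, cur, i); the guard `i < len(lines) and not cur.startswith("# ")`
-- (lines[i] with 0 ≤ i < len(lines) ported as getD i "", exact in range)
def add_tags_loop (lines : List String) (out cur : String) (i : Nat) :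
    String × String × Nat :=
  if h : i < lines.length ∧ PySem.Str.startswith cur "# " = false then
    add_tags_loop lines (out ++ "\r" ++ lines.getD i "") (lines.getD i "") (i + 1)
  else (out, cur, i)
termination_by lines.length - i
decreasing_by omega

def add_tags_alt (markdown : String) : String :=
  let lines := PySem.Str.splitlines markdown
  match lines with
  | [] => ""
  | l0 :: _ =>
    let st := add_tags_loop lines l0 l0 1
    let out := st.1
    let cur := st.2.1
    let i := st.2.2
    if PySem.Str.startswith cur "# " then
      let out2 := out ++ "\r<!-- TAGS -->"
      if i < lines.length then out2 ++ "\r" ++ PySem.Str.join "\r" (lines.drop i)  -- lines[i:]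
      else out2
    else out

-- ===== PRECONDITION & SPEC =====
def Spec_add_tags (markdown : String) (out : String) : Prop := out = add_tags_alt markdown
instance (markdown : String) (out : String) : Decidable (Spec_add_tags markdown out) := by unfold Spec_add_tags; infer_instance

-- ===== CLAIM (what is proved, stated in full; the proofs are below) =====
def Claim_equal_add_tags : Prop := ∀ (markdown : String), Dom_add_tags markdown → Spec_add_tags markdown (add_tags markdown)

-- ===== LEMMAS AND PROOFS =====

-- A's loop body as a named step function
def pvStep (acc : List String × Bool) (l : String) : List String × Bool :=
  let conv := acc.1 ++ [l]
  if PySem.Str.startswith l "# " && !acc.2 then (conv ++ ["<!-- TAGS -->"], true)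
  else (conv, acc.2)

-- common functional description both programs are proved equal to:
-- the result for the line list cur :: t
def pvGo (cur : String) (t : List String) : String :=
  if PySem.Str.startswith cur "# " then
    PySem.Str.join "\r" (cur :: "<!-- TAGS -->" :: t)
  else
    match t with
    | [] => cur
    | r :: rs => cur ++ "\r" ++ pvGo r rs

theorem pvGo_header (cur : String) (t : List String)
    (h : PySem.Str.startswith cur "# " = true) :
    pvGo cur t = PySem.Str.join "\r" (cur :: "<!-- TAGS -->" :: t) := by
  conv_lhs => unfold pvGo
  rw [h]; rfl

theorem pvGo_nil (cur : String) (h : PySem.Str.startswith cur "# " = false) :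
    pvGo cur [] = cur := by
  conv_lhs => unfold pvGo
  rw [h]; rfl

theorem pvGo_cons (cur r : String) (rs : List String)
    (h : PySem.Str.startswith cur "# " = false) :
    pvGo cur (r :: rs) = cur ++ "\r" ++ pvGo r rs := by
  conv_lhs => unfold pvGo
  rw [h]; rfl

theorem pv_found (ls : List String) (acc : List String) :
    ls.foldl pvStep (acc, true) = (acc ++ ls, true) := by
  induction ls generalizing acc with
  | nil => simp
  | cons l t ih => simp [pvStep, ih]

theorem pv_join_cons (h x : String) (t : List String) :
    PySem.Str.join "\r" (h :: x :: t) = h ++ "\r" ++ PySem.Str.join "\r" (x :: t) := by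
  apply String.toList_inj.mp
  simp [PySem.Str.toList_join, PySem.Chars.join_cons_cons, String.toList_append]

theorem pv_join_single (h : String) : PySem.Str.join "\r" [h] = h := by
  apply String.toList_inj.mp
  simp [PySem.Str.toList_join, PySem.Chars.join_singleton]

theorem pv_bridge (l : String) (b : Bool) (hb : PySem.Str.startswith l "# " = b) :
    PySem.Chars.startswith l.toList ['#', ' '] = b := by
  simp [PySem.Str.startswith] at hb
  simpa using hb

theorem pv_join_pair (x y : String) :
    PySem.Str.join "\r" [x, y] = x ++ "\r" ++ y := by
  rw [pv_join_cons, pv_join_single]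

-- A's side: the fold computes pvGo
theorem pv_main (ls : List String) :
    PySem.Str.join "\r" ((ls.foldl pvStep ([], false)).1) =
      (match ls with | [] => "" | h :: t => pvGo h t) := by
  induction ls with
  | nil =>
    apply String.toList_inj.mp
    simp [PySem.Str.toList_join, PySem.Chars.join_nil]
  | cons h t ih =>
    by_cases hh : PySem.Str.startswith h "# " = true
    · have hh2 := pv_bridge h true hh
      rw [show List.foldl pvStep ([], false) (h :: t) = List.foldl pvStep ([h, "<!-- TAGS -->"], true) t from by
        simp [pvStep, hh2]]
      rw [pv_found]
      show PySem.Str.join "\r" ([h, "<!-- TAGS -->"] ++ t) = pvGo h t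
      rw [pvGo_header h t hh]
      rfl
    · have hh' : PySem.Str.startswith h "# " = false := by simpa using hh
      have hh2 := pv_bridge h false hh'
      rw [show List.foldl pvStep ([], false) (h :: t) = List.foldl pvStep ([h], false) t from by
        simp [pvStep, hh2]]
      have hacc : ∀ (u : List String) (a : List String),
          (List.foldl pvStep (a, false) u).1 = a ++ (List.foldl pvStep ([], false) u).1 := by
        intro u
        induction u with
        | nil => intro a; simp
        | cons x xs ihx =>
          intro a
          by_cases hx : PySem.Str.startswith x "# " = true
          · have hx2 := pv_bridge x true hx
            rw [show List.foldl pvStep (a, false) (x :: xs) = List.foldl pvStep (a ++ [x, "<!-- TAGS -->"], true) xs from by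
              simp [pvStep, hx2]]
            rw [show List.foldl pvStep (([] : List String), false) (x :: xs) = List.foldl pvStep ([x, "<!-- TAGS -->"], true) xs from by
              simp [pvStep, hx2]]
            rw [pv_found, pv_found]
            simp
          · have hx' : PySem.Str.startswith x "# " = false := by simpa using hx
            have hx2 := pv_bridge x false hx'
            rw [show List.foldl pvStep (a, false) (x :: xs) = List.foldl pvStep (a ++ [x], false) xs from by
              simp [pvStep, hx2]]
            rw [show List.foldl pvStep (([] : List String), false) (x :: xs) = List.foldl pvStep ([x], false) xs from by
              simp [pvStep, hx2]]
            rw [ihx (a ++ [x]), ihx [x]]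
            simp
      rw [hacc t [h]]
      cases t with
      | nil =>
        show PySem.Str.join "\r" ([h] ++ (List.foldl pvStep ([], false) []).1) = pvGo h []
        rw [pvGo_nil h hh']
        simpa using pv_join_single h
      | cons y ys =>
        have hne : (List.foldl pvStep (([] : List String), false) (y :: ys)).1 ≠ [] := by
          by_cases hy : PySem.Str.startswith y "# " = true
          · have hy2 := pv_bridge y true hy
            rw [show List.foldl pvStep (([] : List String), false) (y :: ys) = List.foldl pvStep ([y, "<!-- TAGS -->"], true) ys from by
              simp [pvStep, hy2]]
            rw [pv_found]; simp
          · have hy' : PySem.Str.startswith y "# " = false := by simpa using hy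
            have hy2 := pv_bridge y false hy'
            rw [show List.foldl pvStep (([] : List String), false) (y :: ys) = List.foldl pvStep ([y], false) ys from by
              simp [pvStep, hy2]]
            rw [hacc ys [y]]; simp
        obtain ⟨z, zs, hz⟩ := List.exists_cons_of_ne_nil hne
        rw [hz]
        rw [show ([h] : List String) ++ z :: zs = h :: z :: zs from rfl]
        rw [pv_join_cons]
        rw [hz] at ih
        rw [ih]
        show h ++ "\r" ++ pvGo y ys = pvGo h (y :: ys)
        rw [pvGo_cons h y ys hh']

theorem pv_tag_lit : ("\r<!-- TAGS -->" : String) = "\r" ++ "<!-- TAGS -->" := by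
  apply String.toList_inj.mp
  simp

-- B's side: the while loop + finishing code computes pvGo
theorem pv_loop (lines : List String) (n : Nat) :
    ∀ (i : Nat), lines.length - i ≤ n → i ≤ lines.length → ∀ (cur p : String),
    (let st := add_tags_loop lines (p ++ cur) cur i
     let out := st.1
     let cur' := st.2.1
     let i' := st.2.2
     if PySem.Str.startswith cur' "# " then
       let out2 := out ++ "\r<!-- TAGS -->"
       if i' < lines.length then out2 ++ "\r" ++ PySem.Str.join "\r" (lines.drop i')
       else out2
     else out) = p ++ pvGo cur (lines.drop i) := by
  induction n with
  | zero =>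
    intro i hn hi cur p
    have hie : i = lines.length := by omega
    rw [add_tags_loop, dif_neg (by omega : ¬ (i < lines.length ∧ PySem.Str.startswith cur "# " = false))]
    by_cases hc : PySem.Str.startswith cur "# " = true
    · rw [if_pos hc, if_neg (by omega : ¬ i < lines.length)]
      rw [hie, List.drop_length, pvGo_header cur [] hc, pv_join_pair, pv_tag_lit]
      simp [String.append_assoc]
    · have hc' : PySem.Str.startswith cur "# " = false := by simpa using hc
      rw [if_neg hc]
      rw [hie, List.drop_length, pvGo_nil cur hc']
  | succ m ih =>
    intro i hn hi cur p
    rw [add_tags_loop]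
    by_cases hc : PySem.Str.startswith cur "# " = true
    · rw [dif_neg (show ¬ (i < lines.length ∧ PySem.Str.startswith cur "# " = false) by
          rintro ⟨_, hf⟩; rw [hc] at hf; exact Bool.noConfusion hf)]
      rw [if_pos hc]
      by_cases hil : i < lines.length
      · rw [if_pos hil]
        have hdrop : lines.drop i ≠ [] := by
          simp [List.drop_eq_nil_iff]; omega
        obtain ⟨z, zs, hz⟩ := List.exists_cons_of_ne_nil hdrop
        rw [hz, pvGo_header cur (z :: zs) hc, pv_join_cons, pv_join_cons, pv_tag_lit]
        apply String.toList_inj.mp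
        simp [String.toList_append]
      · rw [if_neg hil]
        have hie : i = lines.length := by omega
        rw [hie, List.drop_length, pvGo_header cur [] hc, pv_join_pair, pv_tag_lit]
        simp [String.append_assoc]
    · have hc' : PySem.Str.startswith cur "# " = false := by simpa using hc
      by_cases hil : i < lines.length
      · rw [dif_pos ⟨hil, hc'⟩]
        have hz : lines.drop i = lines.getD i "" :: lines.drop (i + 1) := by
          rw [List.getD_eq_getElem?_getD, List.getElem?_eq_getElem hil]
          exact (List.getElem_cons_drop hil).symm
        have hrec := ih (i + 1) (by omega) (by omega) (lines.getD i "") (p ++ cur ++ "\r")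
        rw [hrec, hz, pvGo_cons cur (lines.getD i "") (lines.drop (i + 1)) hc']
        simp [String.append_assoc]
      · rw [dif_neg (by omega : ¬ (i < lines.length ∧ PySem.Str.startswith cur "# " = false))]
        rw [if_neg hc]
        have hie : i = lines.length := by omega
        rw [hie, List.drop_length, pvGo_nil cur hc']

-- ===== VERDICT (by name: the statement is the Claim_ definition above) =====
theorem add_tags_spec : Claim_equal_add_tags := by
  intro markdown _
  unfold Spec_add_tags add_tags add_tags_alt
  cases hls : PySem.Str.splitlines markdown with
  | nil =>
    have hA := pv_main (PySem.Str.splitlines markdown)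
    rw [hls] at hA
    exact hA
  | cons l0 t =>
    have hA := pv_main (PySem.Str.splitlines markdown)
    rw [hls] at hA
    have hB := pv_loop (l0 :: t) ((l0 :: t).length - 1) 1 (by omega) (by simp) l0 ""
    rw [show ("" : String) ++ l0 = l0 from by simp] at hB
    rw [show (l0 :: t).drop 1 = t from rfl] at hB
    rw [show ("" : String) ++ pvGo l0 t = pvGo l0 t from by simp] at hB
    exact hA.trans hB.symm
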